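-- pv_equiv track=rewrite | github.com/anderssh/advent_of_code_2021 | day_8.py | remove_if_both_there
-- ===== SOURCE A (Python) =====
-- def remove_if_both_there(candidate_list, char_list):
--     '''
--     Removes candidate from candidate_list, if all char in char_list are present in candidate
--     returns updatede candidate_list
--     '''
--     to_be_removed = []
--     for i in candidate_list:
--         both_there = True
--         for j in char_list:
--             if j not in i:
--                 both_there = False
--         if both_there:
--             to_be_removed.append(i)
--     for i in to_be_removed:
--         candidate_list.remove(i)
--     return candidate_list, to_be_removed
-- ===== SOURCE B (Python) =====
-- def remove_if_both_there(candidate_list, char_list):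
--     '''Single partition pass: each candidate goes to kept or removed; then the
--     original list is rewritten in place (same mutation contract as A).'''
--     kept, removed = [], []
--     for i in candidate_list:
--         (removed if all(j in i for j in char_list) else kept).append(i)
--     candidate_list[:] = kept
--     return candidate_list, removed
-- ===== Notes on version B (the rewrite author's own statement) =====
-- stated objective: faster
-- what changed: Replaces A's two passes (collect matches, then repeated quadratic list.remove of each match) by one partitioning pass that appends each candidate to a kept or removed list and rewrites the argument in place with slice assignment.
import Mathlib
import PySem

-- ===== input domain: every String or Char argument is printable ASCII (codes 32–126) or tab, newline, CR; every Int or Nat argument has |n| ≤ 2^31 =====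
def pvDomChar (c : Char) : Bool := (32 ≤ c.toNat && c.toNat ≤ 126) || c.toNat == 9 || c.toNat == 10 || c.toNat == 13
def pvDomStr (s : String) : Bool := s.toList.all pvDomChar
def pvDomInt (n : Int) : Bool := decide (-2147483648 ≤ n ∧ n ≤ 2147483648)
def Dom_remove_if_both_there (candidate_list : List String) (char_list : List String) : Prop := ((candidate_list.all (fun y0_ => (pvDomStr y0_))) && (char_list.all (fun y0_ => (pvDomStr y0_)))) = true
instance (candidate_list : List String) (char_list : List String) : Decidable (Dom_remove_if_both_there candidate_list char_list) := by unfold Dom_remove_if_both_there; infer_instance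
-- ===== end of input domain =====

-- B replaces A's collect-then-quadratic-remove passes by one partitioning pass
-- (objective: faster; the in-place mutation of candidate_list is preserved in Source B;
-- the equivalence proved here is about the return value).


-- ===== PORT A =====
def remove_if_both_there (candidate_list : List String) (char_list : List String) : List String × List String :=
  -- first loop: collect candidates containing every char
  let to_be_removed : List String :=
    candidate_list.foldl (fun acc i =>
      let both_there :=
        char_list.foldl (fun b j => if !(PySem.Str.isIn j i) then false else b) true
      if both_there then acc ++ [i] else acc) []
  -- second loop: candidate_list.remove(i); each i was collected from candidate_list in
  -- order, so .remove always finds it and Python never raises: .getD never falls back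
  let candidate_list' :=
    to_be_removed.foldl (fun acc i => (PySem.List.remove? acc i).getD acc) candidate_list
  (candidate_list', to_be_removed)

-- ===== PORT B =====
def remove_if_both_there_alt (candidate_list : List String) (char_list : List String) : List String × List String :=
  -- single partition pass: append each candidate to kept or removed
  let pr : List String × List String :=
    candidate_list.foldl (fun acc i =>
      if char_list.all (fun j => PySem.Str.isIn j i) then (acc.1, acc.2 ++ [i])
      else (acc.1 ++ [i], acc.2)) ([], [])
  -- candidate_list[:] = kept; return candidate_list, removed
  (pr.1, pr.2)

-- ===== PRECONDITION & SPEC =====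
def Spec_remove_if_both_there (candidate_list : List String) (char_list : List String) (out : List String × List String) : Prop := out = remove_if_both_there_alt candidate_list char_list
instance (candidate_list : List String) (char_list : List String) (out : List String × List String) : Decidable (Spec_remove_if_both_there candidate_list char_list out) := by unfold Spec_remove_if_both_there; infer_instance

-- ===== CLAIM (what is proved, stated in full; the proofs are below) =====
def Claim_equal_remove_if_both_there : Prop := ∀ (candidate_list : List String) (char_list : List String), Dom_remove_if_both_there candidate_list char_list → Spec_remove_if_both_there candidate_list char_list (remove_if_both_there candidate_list char_list)

-- ===== LEMMAS AND PROOFS =====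

-- A's inner flag loop computes `all`
theorem inner_flag (i : String) (char_list : List String) (b : Bool) :
    char_list.foldl (fun b j => if !(PySem.Str.isIn j i) then false else b) b
      = (b && char_list.all (fun j => PySem.Str.isIn j i)) := by
  induction char_list generalizing b with
  | nil => simp
  | cons j rest ih =>
      simp only [List.foldl_cons, List.all_cons, ih]
      cases h : PySem.Str.isIn j i <;> simp

-- A's collection loop is a filter
theorem collect_eq_filter (p : String → Bool) (cl : List String) (init : List String) :
    cl.foldl (fun acc i => if p i then acc ++ [i] else acc) init = init ++ cl.filter p := by
  induction cl generalizing init with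
  | nil => simp
  | cons x cl ih =>
      simp only [List.foldl_cons, List.filter_cons]
      cases h : p x <;> simp [ih]

-- removing elements all distinct from the head leaves the head in place
theorem foldl_remove_cons_ne (rs : List String) (x : String) :
    ∀ (cl : List String), (∀ r ∈ rs, r ≠ x) →
    rs.foldl (fun acc i => (PySem.List.remove? acc i).getD acc) (x :: cl)
      = x :: rs.foldl (fun acc i => (PySem.List.remove? acc i).getD acc) cl := by
  induction rs with
  | nil => intro cl _; simp
  | cons r rs ih =>
      intro cl h
      have hne : x ≠ r := fun e => (h r (by simp)) e.symm
      simp only [List.foldl_cons]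
      rw [PySem.List.remove?_cons_of_ne cl hne]
      cases hr : PySem.List.remove? cl r with
      | none => simp [ih _ (fun a ha => h a (by simp [ha]))]
      | some l => simp [ih _ (fun a ha => h a (by simp [ha]))]

-- removing, in order, exactly the p-elements of cl from cl leaves the non-p elements
theorem remove_filter (p : String → Bool) (cl : List String) :
    (cl.filter p).foldl (fun acc i => (PySem.List.remove? acc i).getD acc) cl
      = cl.filter (fun i => !p i) := by
  induction cl with
  | nil => simp
  | cons x cl ih =>
      by_cases hx : p x
      · simp only [List.filter_cons, hx, if_pos, List.foldl_cons,
          PySem.List.remove?_cons_self, Option.getD_some]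
        simp [ih]
      · have hx' : p x = false := by simpa using hx
        have hne : ∀ r ∈ cl.filter p, r ≠ x := by
          intro r hr e
          rcases List.mem_filter.mp hr with ⟨_, hp⟩
          rw [e, hx'] at hp; exact Bool.false_ne_true hp
        simp only [List.filter_cons, hx', if_neg Bool.false_ne_true]
        rw [foldl_remove_cons_ne _ _ _ hne, ih]
        simp

-- B's partition loop
theorem partition_fold (p : String → Bool) (cl : List String) (k r : List String) :
    cl.foldl (fun (acc : List String × List String) i =>
        if p i then (acc.1, acc.2 ++ [i]) else (acc.1 ++ [i], acc.2)) (k, r)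
      = (k ++ cl.filter (fun i => !p i), r ++ cl.filter p) := by
  induction cl generalizing k r with
  | nil => simp
  | cons x cl ih =>
      simp only [List.foldl_cons, List.filter_cons]
      cases h : p x <;> simp [ih]

-- ===== VERDICT (by name: the statement is the Claim_ definition above) =====
theorem remove_if_both_there_spec : Claim_equal_remove_if_both_there := by
  intro cl chl _
  unfold Spec_remove_if_both_there remove_if_both_there remove_if_both_there_alt
  set p : String → Bool := fun i => chl.all (fun j => PySem.Str.isIn j i) with hp
  have hinner : ∀ i : String,
      (chl.foldl (fun b j => if !(PySem.Str.isIn j i) then false else b) true) = p i := by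
    intro i; rw [inner_flag]; simp [hp]
  simp only [hinner, collect_eq_filter, List.nil_append, remove_filter, partition_fold,
    List.nil_append]
  simp only [hp]
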